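-- pv_equiv track=rewrite | github.com/Suniron/coding-dojo-Python3 | katas/anagram/anagram.py | getTwoWordsAnagramsListForWord
-- ===== SOURCE A (Python) =====
-- from collections import Counter
--
-- def getLetterListFromTwoWords(word1, word2):
--     return list(word1.lower()) + list(word2.lower())
--
-- def isWordMatchWithLetterList(word, letterList):
--     # force to lower case
--     word = word.lower()
--
--     # Size check
--     if len(word) != len(letterList):
--         return False
--
--     # check if match
--     if Counter(list(word)) == Counter(letterList):
--         return True
--
--     return False
--
-- def getTwoWordsAnagramsListForWord(wordList, word):
--     "Return a list of two words annagrams for gived word or an empty list if none"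
--
--     matches = []  # to store results
--
--     # get matches:
--     for word1 in wordList:
--         for word2 in wordList:
--             if word1 == word2:
--                 pass
--             # if not same word:
--             letters = getLetterListFromTwoWords(word1, word2)
--
--             if isWordMatchWithLetterList(word, letters):
--                 # check if already inside matches
--                 if sorted([word1, word2]) in matches:
--                     pass
--                 else:
--                     matches.append(sorted([word1, word2]))
--     return matches
-- ===== SOURCE B (Python) =====
-- def _msub(target, sub):
--     """Multiset difference of two ascending char lists: target minus sub.
--     Returns the remaining letters (still ascending) or None if sub is not
--     contained in target with multiplicity.  Two-pointer merge."""
--     out = []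
--     i = 0
--     for b in sub:
--         while i < len(target) and target[i] < b:
--             out.append(target[i])
--             i += 1
--         if i < len(target) and target[i] == b:
--             i += 1
--         else:
--             return None
--     out.extend(target[i:])
--     return out
--
--
-- def getTwoWordsAnagramsListForWord(wordList, word):
--     "Return a list of two words annagrams for gived word or an empty list if none"
--     target = sorted(word.lower())
--
--     # index words by their letter signature (sorted lowercase letters)
--     index = {}
--     for w in wordList:
--         index.setdefault(''.join(sorted(w.lower())), []).append(w)
--
--     matches = []
--     for word1 in wordList:
--         rest = _msub(target, sorted(word1.lower()))
--         if rest is None: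
--             continue
--         for word2 in index.get(''.join(rest), []):
--             pair = sorted([word1, word2])
--             if pair not in matches:
--                 matches.append(pair)
--     return matches
-- ===== Notes on version B (the rewrite author's own statement) =====
-- stated objective: faster
-- what changed: A compares Counter(word) against every ordered pair of words (all n^2 pairs); B sorts each word's lowercase letters once, builds a dict from letter-signature to the words carrying it, and for each first word looks up the complement signature (target letters minus the word's letters), so only actually-matching second words are ever visited.
import Mathlib
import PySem

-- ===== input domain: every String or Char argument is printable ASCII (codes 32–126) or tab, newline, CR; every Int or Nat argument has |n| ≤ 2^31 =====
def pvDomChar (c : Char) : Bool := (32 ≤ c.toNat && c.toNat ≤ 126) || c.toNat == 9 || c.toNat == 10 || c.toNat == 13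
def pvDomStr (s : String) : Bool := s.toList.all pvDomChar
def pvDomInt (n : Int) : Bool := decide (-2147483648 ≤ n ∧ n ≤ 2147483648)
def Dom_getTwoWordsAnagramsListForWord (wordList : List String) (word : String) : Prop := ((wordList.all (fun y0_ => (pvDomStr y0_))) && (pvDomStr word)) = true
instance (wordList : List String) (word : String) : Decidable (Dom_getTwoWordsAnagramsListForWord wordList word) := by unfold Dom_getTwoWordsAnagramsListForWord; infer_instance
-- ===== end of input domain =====

-- B replaces A's O(n^2) all-pairs Counter comparison by a signature index (sorted lowercase
-- letters) looked up with the complement of each word's letters; same return value.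

-- ===== PORT A =====
-- list(word1.lower()) + list(word2.lower()), ported on the list side (PySem.Chars.lower)
def getLetterListFromTwoWords (word1 word2 : String) : List Char :=
  PySem.Chars.lower word1.toList ++ PySem.Chars.lower word2.toList

-- Python's '==' between two Counters is dict equality: the same key set and the same
-- count at every key (counts built from a list are always positive, so this is exact).
def pyCounterEq (d1 d2 : PySem.Dict Char Int) : Bool :=
  PySem.Set.equal (PySem.Set.ofList d1.keys) (PySem.Set.ofList d2.keys) &&
  d1.keys.all (fun k => d1.getD k 0 == d2.getD k 0)

def isWordMatchWithLetterList (word : String) (letterList : List Char) : Bool :=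
  -- word = word.lower()  (kept as a list of chars)
  let wordL := PySem.Chars.lower word.toList
  -- size check
  if (wordL.length : Int) ≠ (letterList.length : Int) then false
  -- Counter(list(word)) == Counter(letterList)
  else if pyCounterEq (PySem.Dict.counter wordL) (PySem.Dict.counter letterList) then true
  else false

def getTwoWordsAnagramsListForWord (wordList : List String) (word : String) : List (List String) :=
  wordList.foldl (fun ms word1 =>
    wordList.foldl (fun ms word2 =>
      -- 'if word1 == word2: pass' in the source is a no-op
      let letters := getLetterListFromTwoWords word1 word2
      if isWordMatchWithLetterList word letters then
        let p := PySem.List.sorted [word1, word2] (fun x => x)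
        if p ∈ ms then ms else ms ++ [p]
      else ms) ms) []

-- ===== PORT B =====
-- _msub from Source B: two-pointer merge computing target minus sub as multisets of
-- ascending char lists (none where Source B returns None); the loop over sub with the
-- inner 'while' advancing over target is written as the evident recursion, the
-- emitted smaller elements accumulated by the Option.map cons.
def msub : List Char → List Char → Option (List Char)
  | t, [] => some t
  | [], _ :: _ => none
  | a :: t, b :: s =>
    if a < b then (msub t (b :: s)).map (a :: ·)
    else if a = b then msub t s
    else none

-- sorted(w.lower()) — the letter signature used by Source B
def pySig (w : String) : List Char :=
  PySem.List.sorted (PySem.Chars.lower w.toList) (fun c => c)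

def getTwoWordsAnagramsListForWord_alt (wordList : List String) (word : String) : List (List String) :=
  let target := pySig word
  -- index.setdefault(''.join(sorted(w.lower())), []).append(w)
  let index := wordList.foldl
    (fun d w => d.modify (String.ofList (pySig w)) [] (· ++ [w])) PySem.Dict.empty
  wordList.foldl (fun ms word1 =>
    match msub target (pySig word1) with
    | none => ms
    | some rest =>
      (index.getD (String.ofList rest) []).foldl (fun ms word2 =>
        let p := PySem.List.sorted [word1, word2] (fun x => x)
        if p ∈ ms then ms else ms ++ [p]) ms) []

-- ===== PRECONDITION & SPEC =====
def Spec_getTwoWordsAnagramsListForWord (wordList : List String) (word : String) (out : List (List String)) : Prop := out = getTwoWordsAnagramsListForWord_alt wordList word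
instance (wordList : List String) (word : String) (out : List (List String)) : Decidable (Spec_getTwoWordsAnagramsListForWord wordList word out) := by unfold Spec_getTwoWordsAnagramsListForWord; infer_instance

-- ===== CLAIM (what is proved, stated in full; the proofs are below) =====
def Claim_equal_getTwoWordsAnagramsListForWord : Prop := ∀ (wordList : List String) (word : String), Dom_getTwoWordsAnagramsListForWord wordList word → Spec_getTwoWordsAnagramsListForWord wordList word (getTwoWordsAnagramsListForWord wordList word)

-- ===== LEMMAS AND PROOFS =====

theorem keys_counter (l : List Char) :
    (PySem.Dict.counter l).keys = PySem.Set.ofList l := by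
  simp [PySem.Dict.keys, PySem.Dict.items_counter, List.map_map, Function.comp_def]

-- Counter(l1) == Counter(l2) says exactly that l1 and l2 are permutations
theorem pyCounterEq_counter_iff (l1 l2 : List Char) :
    pyCounterEq (PySem.Dict.counter l1) (PySem.Dict.counter l2) = true ↔ l1.Perm l2 := by
  unfold pyCounterEq
  rw [Bool.and_eq_true, PySem.Set.equal_iff, List.all_eq_true]
  constructor
  · rintro ⟨hmem, hall⟩
    rw [List.perm_iff_count]
    intro a
    by_cases ha : a ∈ l1
    · have h1 : a ∈ (PySem.Dict.counter l1).keys := by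
        rw [keys_counter, PySem.Set.mem_ofList]; exact ha
      have := hall a h1
      rw [beq_iff_eq, PySem.Dict.getD_counter, PySem.Dict.getD_counter] at this
      exact_mod_cast this
    · have ha2 : a ∉ l2 := by
        intro h2
        apply ha
        have := (hmem a).2 (by rw [PySem.Set.mem_ofList, keys_counter, PySem.Set.mem_ofList]; exact h2)
        rw [PySem.Set.mem_ofList, keys_counter, PySem.Set.mem_ofList] at this
        exact this
      rw [List.count_eq_zero_of_not_mem ha, List.count_eq_zero_of_not_mem ha2]
  · intro hp
    constructor
    · intro a
      rw [PySem.Set.mem_ofList, PySem.Set.mem_ofList, keys_counter, keys_counter,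
        PySem.Set.mem_ofList, PySem.Set.mem_ofList]
      exact hp.mem_iff
    · intro a _
      rw [beq_iff_eq, PySem.Dict.getD_counter, PySem.Dict.getD_counter]
      exact_mod_cast (List.perm_iff_count.1 hp a)

theorem msub_perm : ∀ {t s r : List Char}, msub t s = some r → (s ++ r).Perm t := by
  intro t
  induction t with
  | nil =>
    intro s r h
    cases s with
    | nil => simp [msub] at h; simp [h]
    | cons b s => simp [msub] at h
  | cons a t ih =>
    intro s r h
    cases s with
    | nil =>
      simp [msub] at h; simp [h]
    | cons b s =>
      simp only [msub] at h
      split at h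
      · rcases Option.map_eq_some_iff.1 h with ⟨r', hr', rfl⟩
        have := ih hr'
        exact List.perm_middle.trans (this.cons a)
      · split at h
        · rename_i hab
          subst hab
          have := ih h
          simpa using this.cons a
        · exact absurd h (by simp)

theorem msub_sublist : ∀ {t s r : List Char}, msub t s = some r → r.Sublist t := by
  intro t
  induction t with
  | nil =>
    intro s r h
    cases s with
    | nil => simp [msub] at h; simp [h]
    | cons b s => simp [msub] at h
  | cons a t ih =>
    intro s r h
    cases s with
    | nil => simp [msub] at h; simp [h]
    | cons b s =>
      simp only [msub] at h
      split at h
      · rcases Option.map_eq_some_iff.1 h with ⟨r', hr', rfl⟩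
        exact (ih hr').cons₂ a
      · split at h
        · exact (ih h).cons a
        · exact absurd h (by simp)

theorem msub_eq_none : ∀ {t s : List Char}, t.Pairwise (· ≤ ·) → s.Pairwise (· ≤ ·) →
    msub t s = none → ¬ ((s : Multiset Char) ≤ (t : Multiset Char)) := by
  intro t
  induction t with
  | nil =>
    intro s _ _ h hle
    cases s with
    | nil => simp [msub] at h
    | cons b s =>
      have := Multiset.le_zero.1 hle
      simp at this
  | cons a t ih =>
    intro s ht hs h hle
    cases s with
    | nil => simp [msub] at h
    | cons b s =>
      simp only [msub] at h
      split at h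
      · rename_i hab
        have hnone : msub t (b :: s) = none := by
          cases hm : msub t (b :: s) with
          | none => rfl
          | some r => rw [hm] at h; simp at h
        apply ih (List.Pairwise.of_cons ht) hs hnone
        rw [Multiset.le_iff_count] at hle ⊢
        intro x
        have hx := hle x
        by_cases hxa : x = a
        · subst hxa
          have : x ∉ b :: s := by
            intro hmem
            have : b ≤ x := by
              rcases hmem with _ | hmem
              · exact le_refl _
              · exact List.rel_of_pairwise_cons hs (by assumption)
            exact absurd (lt_of_lt_of_le hab this) (lt_irrefl x)
          simp [List.count_eq_zero_of_not_mem this]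
        · simpa [List.count_cons, if_neg (show ¬ a = x from fun h => hxa h.symm)] using hx
      · split at h
        · rename_i hab
          subst hab
          apply ih (List.Pairwise.of_cons ht) (List.Pairwise.of_cons hs) h
          have : (a ::ₘ (s : Multiset Char)) ≤ (a ::ₘ (t : Multiset Char)) := by
            simpa using hle
          exact (Multiset.cons_le_cons_iff a).1 this
        · rename_i h1 h2
          have hba : b < a := by
            rcases lt_trichotomy a b with h' | h' | h'
            · exact absurd h' h1
            · exact absurd h' h2
            · exact h'
          have hbmem : b ∉ a :: t := by
            intro hmem
            have : a ≤ b := by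
              rcases hmem with _ | hmem
              · exact le_refl _
              · exact List.rel_of_pairwise_cons ht (by assumption)
            exact absurd (lt_of_lt_of_le hba this) (lt_irrefl b)
          rw [Multiset.le_iff_count] at hle
          have := hle b
          simp [List.count_eq_zero_of_not_mem hbmem, List.count_cons_self] at this

theorem pySig_perm (w : String) : (pySig w).Perm (PySem.Chars.lower w.toList) :=
  PySem.List.sorted_perm _ _ _

theorem pySig_pairwise (w : String) : (pySig w).Pairwise (· ≤ ·) := by
  unfold pySig
  exact PySem.List.sorted_pairwise (PySem.Chars.lower w.toList) (fun c => c)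

-- A's per-pair test, characterised through B's complement lookup
theorem match_iff (word w1 w2 : String) :
    isWordMatchWithLetterList word (getLetterListFromTwoWords w1 w2) = true ↔
      msub (pySig word) (pySig w1) = some (pySig w2) := by
  constructor
  · intro h
    unfold isWordMatchWithLetterList at h
    simp only [getLetterListFromTwoWords] at h
    split at h
    · simp at h
    · split at h
      · rename_i hcnt
        have hperm : (PySem.Chars.lower word.toList).Perm
            (PySem.Chars.lower w1.toList ++ PySem.Chars.lower w2.toList) :=
          (pyCounterEq_counter_iff _ _).1 hcnt
        have hsig : (pySig w1 ++ pySig w2).Perm (pySig word) :=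
          (((pySig_perm w1).append (pySig_perm w2)).trans hperm.symm).trans (pySig_perm word).symm
        have hle : ((pySig w1 : Multiset Char)) ≤ (pySig word : Multiset Char) := by
          have : ((pySig w1 : Multiset Char) + (pySig w2 : Multiset Char)) = (pySig word : Multiset Char) := by
            simpa using Multiset.coe_eq_coe.2 hsig
          rw [← this]
          exact Multiset.le_add_right _ _
        cases hm : msub (pySig word) (pySig w1) with
        | none =>
          exact absurd hle (msub_eq_none (pySig_pairwise word) (pySig_pairwise w1) hm)
        | some r =>
          have hp := msub_perm hm
          have hr2 : r.Perm (pySig w2) :=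
            (List.perm_append_left_iff (pySig w1)).1 (hp.trans hsig.symm)
          have hrsorted : r.Pairwise (· ≤ ·) :=
            (pySig_pairwise word).sublist (msub_sublist hm)
          have : r = pySig w2 :=
            List.Perm.eq_of_pairwise (fun a b _ _ h1 h2 => le_antisymm h1 h2)
              hrsorted (pySig_pairwise w2) hr2
          rw [this]
      · simp at h
  · intro hm
    have hp := msub_perm hm
    have hperm : (PySem.Chars.lower word.toList).Perm
        (PySem.Chars.lower w1.toList ++ PySem.Chars.lower w2.toList) :=
      ((pySig_perm word).symm.trans hp.symm).trans ((pySig_perm w1).append (pySig_perm w2))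
    unfold isWordMatchWithLetterList
    simp only [getLetterListFromTwoWords]
    have hl := hperm.length_eq
    rw [if_neg (by simp at hl ⊢; omega), if_pos ((pyCounterEq_counter_iff _ _).2 hperm)]

-- the signature index holds, at each key, exactly the words with that signature (in list order)
theorem index_getD (wordList : List String) (k : String) :
    (wordList.foldl (fun d w => d.modify (String.ofList (pySig w)) [] (· ++ [w]))
        PySem.Dict.empty).getD k []
      = wordList.filter (fun w => String.ofList (pySig w) == k) := by
  have h := PySem.Dict.getD_foldl_modify_append
    (wordList.map (fun w => (String.ofList (pySig w), w))) PySem.Dict.empty k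
  rw [List.foldl_map] at h
  rw [h, List.filter_map, List.map_map]
  simp [Function.comp_def]

theorem ofList_inj {a b : List Char} (h : String.ofList a = String.ofList b) : a = b := by
  have := congrArg String.toList h
  simpa using this

-- ===== VERDICT (by name: the statement is the Claim_ definition above) =====
set_option maxHeartbeats 400000 in
theorem getTwoWordsAnagramsListForWord_spec : Claim_equal_getTwoWordsAnagramsListForWord := by
  intro wordList word _
  unfold Spec_getTwoWordsAnagramsListForWord
  simp only [getTwoWordsAnagramsListForWord, getTwoWordsAnagramsListForWord_alt]
  apply List.foldl_ext
  intro m w1 _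
  rw [PySem.List.foldl_if_eq_foldl_filter
    (fun w2 => isWordMatchWithLetterList word (getLetterListFromTwoWords w1 w2))
    (fun m w2 => if PySem.List.sorted [w1, w2] (fun x => x) ∈ m then m
      else m ++ [PySem.List.sorted [w1, w2] (fun x => x)]) wordList m]
  cases hm : msub (pySig word) (pySig w1) with
  | none =>
    have : wordList.filter
        (fun w2 => isWordMatchWithLetterList word (getLetterListFromTwoWords w1 w2)) = [] := by
      rw [List.filter_eq_nil_iff]
      intro w2 _ hmatch
      rw [match_iff] at hmatch
      rw [hm] at hmatch
      simp at hmatch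
    rw [this]
    rfl
  | some rest =>
    change List.foldl
        (fun m w2 =>
          if (PySem.List.sorted [w1, w2] fun x => x) ∈ m then m
          else m ++ [PySem.List.sorted [w1, w2] fun x => x])
        m (List.filter (fun w2 => isWordMatchWithLetterList word (getLetterListFromTwoWords w1 w2)) wordList) =
      List.foldl
        (fun ms word2 =>
          if (PySem.List.sorted [w1, word2] fun x => x) ∈ ms then ms
          else ms ++ [PySem.List.sorted [w1, word2] fun x => x])
        m
        ((List.foldl (fun d w => d.modify (String.ofList (pySig w)) [] fun x => x ++ [w]) PySem.Dict.empty
            wordList).getD (String.ofList rest) [])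
    have hfil : List.filter (fun w2 => isWordMatchWithLetterList word (getLetterListFromTwoWords w1 w2)) wordList
        = List.filter (fun w => String.ofList (pySig w) == String.ofList rest) wordList := by
      apply List.filter_congr
      intro w2 _
      rw [Bool.eq_iff_iff]
      constructor
      · intro h
        rw [match_iff, hm] at h
        injection h with h
        simp [h]
      · intro h
        rw [beq_iff_eq] at h
        rw [match_iff, hm, ofList_inj h]
    rw [index_getD, hfil]
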